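-- pv_equiv track=rewrite | github.com/xxori/advent-of-code | src/aoc_2024/day_12.py | proc
-- ===== SOURCE A (Python) =====
-- point = tuple[int, int]
--
-- def proc(
--     grid: list[list[str]],
--     visited: list[list[bool]],
--     acc: tuple[list[tuple[point, point]], int],
--     loc: point,
--     prev: point,
--     finding: str,
-- ) -> tuple[list[tuple[point, point]], int]:
--     r, c = loc
--     # If the location is out of the grid or a different char, it marks the edge of the partition
--     if not 0 <= r < len(grid) or not 0 <= c < len(grid[0]) or grid[r][c] != finding:
--         return ([(prev, loc), *acc[0]], acc[1])
--     # If we have already visited the location, we can just short circuit and exit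
--     if visited[r][c]:
--         return acc
--
--     # Mark visited and increment area, and process for each adjacent tile
--     visited[r][c] = True
--     acc = (acc[0], acc[1] + 1)
--     for offset in [(r + 1, c), (r - 1, c), (r, c + 1), (r, c - 1)]:
--         acc = proc(grid, visited, acc, offset, loc, finding)
--     return acc
-- ===== SOURCE B (Python) =====
-- def proc(grid, visited, acc, loc, prev, finding):
--     # Iterative DFS with an explicit stack of (loc, prev) frames replacing the recursion.
--     edges = []
--     area = 0
--     stack = [(loc, prev)]
--     while stack:
--         (r, c), pv = stack.pop()
--         if not 0 <= r < len(grid) or not 0 <= c < len(grid[0]) or grid[r][c] != finding: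
--             edges.append((pv, (r, c)))
--             continue
--         if visited[r][c]:
--             continue
--         visited[r][c] = True
--         area += 1
--         # pushed so that they pop in the order (r+1,c), (r-1,c), (r,c+1), (r,c-1)
--         stack.extend([((r, c - 1), (r, c)), ((r, c + 1), (r, c)),
--                       ((r - 1, c), (r, c)), ((r + 1, c), (r, c))])
--     return (list(reversed(edges)) + acc[0], acc[1] + area)
-- ===== Notes on version B (the rewrite author's own statement) =====
-- stated objective: alternative
-- what changed: Replaces the recursive flood fill (four self-calls per cell, edges prepended on the way) by an iterative DFS over an explicit stack of (loc, prev) frames that counts area and appends boundary edges in encounter order, then reverses them onto the incoming accumulator.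
import Mathlib
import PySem

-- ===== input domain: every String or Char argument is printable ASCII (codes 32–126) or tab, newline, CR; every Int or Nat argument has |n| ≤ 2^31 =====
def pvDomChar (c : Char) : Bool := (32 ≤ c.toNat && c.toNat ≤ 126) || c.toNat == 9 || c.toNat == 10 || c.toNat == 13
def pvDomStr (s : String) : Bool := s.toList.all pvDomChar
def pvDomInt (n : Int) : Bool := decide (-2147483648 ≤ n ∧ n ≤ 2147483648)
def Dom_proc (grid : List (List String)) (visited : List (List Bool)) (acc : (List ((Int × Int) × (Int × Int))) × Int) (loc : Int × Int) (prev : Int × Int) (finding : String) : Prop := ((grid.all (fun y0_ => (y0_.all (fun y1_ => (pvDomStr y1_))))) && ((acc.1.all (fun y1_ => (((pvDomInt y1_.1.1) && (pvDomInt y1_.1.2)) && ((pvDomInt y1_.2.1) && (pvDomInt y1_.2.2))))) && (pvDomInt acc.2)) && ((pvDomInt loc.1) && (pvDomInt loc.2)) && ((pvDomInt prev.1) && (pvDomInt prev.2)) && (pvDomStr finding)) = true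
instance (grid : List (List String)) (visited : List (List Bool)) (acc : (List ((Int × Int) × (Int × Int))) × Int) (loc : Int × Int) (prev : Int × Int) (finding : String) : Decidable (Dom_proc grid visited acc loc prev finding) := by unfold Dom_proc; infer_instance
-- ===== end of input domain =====

-- B replaces A's recursive flood fill by an iterative DFS over an explicit list-as-stack of
-- (loc, prev) frames (objective: alternative decomposition, same cost).  Both Pythons
-- mutate `visited` in place identically; the equivalence proved here is about the
-- RETURN value (the ports thread `visited` functionally and drop it at the end).
-- Both ports carry a fuel argument as a totality guard only; `pvCountFalse visited + 1`
-- (resp. `4 * pvCountFalse visited + 1`) is proved sufficient, so the guard branch is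
-- never reached from `proc` / `proc_alt`.

-- shared small accessors (Python grid[r][c] / visited[r][c], and visited[r][c] = True)
def pvCellAt (grid : List (List String)) (r c : Int) : Option String :=
  (PySem.List.pyGet? grid r).bind (fun row => PySem.List.pyGet? row c)

def pvVisAt (v : List (List Bool)) (r c : Int) : Option Bool :=
  (PySem.List.pyGet? v r).bind (fun row => PySem.List.pyGet? row c)

def pvVisSet (v : List (List Bool)) (r c : Int) : List (List Bool) :=
  v.set r.toNat ((v.getD r.toNat []).set c.toNat true)

-- number of still-unvisited cells: the fuel bound of both ports
def pvCountFalse (v : List (List Bool)) : Nat := (v.map (fun row => row.count false)).sum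

-- the boundary test of both Pythons:
-- `not 0 <= r < len(grid) or not 0 <= c < len(grid[0]) or grid[r][c] != finding`
def pvIsEdge (grid : List (List String)) (r c : Int) (finding : String) : Bool :=
  !(decide (0 ≤ r ∧ r < (grid.length : Int))) ||
    !(decide (0 ≤ c ∧ c < ((grid.headD []).length : Int))) ||
    decide (pvCellAt grid r c ≠ some finding)

-- ===== PORT A =====
-- Literal port of the recursion; `visited` (mutated in place in Python) is threaded
-- through.  Where the Python would raise IndexError (`visited[r][c]` out of range,
-- outside Pre_proc) the port returns acc unchanged; that branch is merged with the
-- `if visited[r][c]` short-circuit (same value).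
def procAuxF (fuel : Nat) (grid : List (List String)) (visited : List (List Bool))
    (acc : (List ((Int × Int) × (Int × Int))) × Int) (loc prev : Int × Int) (finding : String) :
    List (List Bool) × ((List ((Int × Int) × (Int × Int))) × Int) :=
  match fuel with
  | 0 => (visited, acc)   -- fuel guard, proved unreachable from proc
  | fuel + 1 =>
    if pvIsEdge grid loc.1 loc.2 finding then
      (visited, ((prev, loc) :: acc.1, acc.2))
    else if pvVisAt visited loc.1 loc.2 = some false then
      -- mark visited, increment area, recurse on the four neighbours in order
      let q1 := procAuxF fuel grid (pvVisSet visited loc.1 loc.2) (acc.1, acc.2 + 1) (loc.1 + 1, loc.2) loc finding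
      let q2 := procAuxF fuel grid q1.1 q1.2 (loc.1 - 1, loc.2) loc finding
      let q3 := procAuxF fuel grid q2.1 q2.2 (loc.1, loc.2 + 1) loc finding
      procAuxF fuel grid q3.1 q3.2 (loc.1, loc.2 - 1) loc finding
    else
      -- already visited (or Python IndexError, outside Pre_proc): short circuit
      (visited, acc)

def proc (grid : List (List String)) (visited : List (List Bool)) (acc : (List ((Int × Int) × (Int × Int))) × Int) (loc : Int × Int) (prev : Int × Int) (finding : String) : (List ((Int × Int) × (Int × Int))) × Int :=
  (procAuxF (pvCountFalse visited + 1) grid visited acc loc prev finding).2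

-- ===== PORT B =====
-- Iterative DFS: Lean list head = Python list end (stack top); a pop takes the head,
-- `stack.extend([left, right, up, down])` becomes consing down/up/right/left so frames
-- pop in A's order.  `edges` grows at the tail (Python edges.append) in encounter order.
def procBLoopF (fuel : Nat) (grid : List (List String)) (finding : String)
    (stack : List ((Int × Int) × (Int × Int))) (visited : List (List Bool))
    (edges : List ((Int × Int) × (Int × Int))) (area : Int) :
    List (List Bool) × (List ((Int × Int) × (Int × Int))) × Int :=
  match fuel, stack with
  | _, [] => (visited, edges, area)
  | 0, _ => (visited, edges, area)   -- fuel guard, proved unreachable from proc_alt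
  | fuel + 1, (lc, pv) :: rest =>
    if pvIsEdge grid lc.1 lc.2 finding then
      procBLoopF fuel grid finding rest visited (edges ++ [(pv, lc)]) area
    else if pvVisAt visited lc.1 lc.2 = some false then
      procBLoopF fuel grid finding
        (((lc.1 + 1, lc.2), lc) :: ((lc.1 - 1, lc.2), lc) :: ((lc.1, lc.2 + 1), lc) :: ((lc.1, lc.2 - 1), lc) :: rest)
        (pvVisSet visited lc.1 lc.2) edges (area + 1)
    else
      -- already visited (or Python IndexError, outside Pre_proc): drop the frame
      procBLoopF fuel grid finding rest visited edges area

def proc_alt (grid : List (List String)) (visited : List (List Bool)) (acc : (List ((Int × Int) × (Int × Int))) × Int) (loc : Int × Int) (prev : Int × Int) (finding : String) : (List ((Int × Int) × (Int × Int))) × Int :=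
  let t := procBLoopF (4 * pvCountFalse visited + 1) grid finding [(loc, prev)] visited [] 0
  (t.2.1.reverse ++ acc.1, acc.2 + t.2.2)

-- ===== PRECONDITION & SPEC =====
-- Pre_proc excludes the inputs on which the Python A raises IndexError (a grid row shorter
-- than grid[0], or `visited` smaller than the grid, reached by the fill); being closed-form it
-- also excludes (stated narrowing, see claim.json cites) ragged/mismatched-shape inputs on
-- which A happens to return because the fill stops before reaching the ragged part.
def Pre_proc (grid : List (List String)) (visited : List (List Bool)) (acc : (List ((Int × Int) × (Int × Int))) × Int) (loc : Int × Int) (prev : Int × Int) (finding : String) : Prop :=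
  ((∀ row ∈ grid, row.length = (grid.headD []).length) ∧
   visited.length = grid.length ∧
   (∀ row ∈ visited, row.length = (grid.headD []).length)) ∨
  (¬(0 ≤ loc.1 ∧ loc.1 < (grid.length : Int)) ∨
   ¬(0 ≤ loc.2 ∧ loc.2 < ((grid.headD []).length : Int)) ∨
   (0 ≤ loc.1 ∧ loc.1 < (grid.length : Int) ∧ 0 ≤ loc.2 ∧ loc.2 < ((grid.headD []).length : Int) ∧
    loc.2 < ((grid.getD loc.1.toNat []).length : Int) ∧ pvCellAt grid loc.1 loc.2 ≠ some finding))

instance (grid : List (List String)) (visited : List (List Bool)) (acc : (List ((Int × Int) × (Int × Int))) × Int) (loc : Int × Int) (prev : Int × Int) (finding : String) : Decidable (Pre_proc grid visited acc loc prev finding) := by unfold Pre_proc; infer_instance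

def pvWitness_proc : List (List String) × List (List Bool) × ((List ((Int × Int) × (Int × Int))) × Int) × (Int × Int) × (Int × Int) × String :=
  ([["a", "a"], ["a", "b"]], [[false, false], [false, false]], ([], 0), (0, 0), (-1, 0), "a")

def Spec_proc (grid : List (List String)) (visited : List (List Bool)) (acc : (List ((Int × Int) × (Int × Int))) × Int) (loc : Int × Int) (prev : Int × Int) (finding : String) (out : (List ((Int × Int) × (Int × Int))) × Int) : Prop := out = proc_alt grid visited acc loc prev finding
instance (grid : List (List String)) (visited : List (List Bool)) (acc : (List ((Int × Int) × (Int × Int))) × Int) (loc : Int × Int) (prev : Int × Int) (finding : String) (out : (List ((Int × Int) × (Int × Int))) × Int) : Decidable (Spec_proc grid visited acc loc prev finding out) := by unfold Spec_proc; infer_instance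

-- ===== CLAIM (what is proved, stated in full; the proofs are below) =====
def Claim_equal_proc : Prop := ∀ (grid : List (List String)) (visited : List (List Bool)) (acc : (List ((Int × Int) × (Int × Int))) × Int) (loc : Int × Int) (prev : Int × Int) (finding : String), Dom_proc grid visited acc loc prev finding → Pre_proc grid visited acc loc prev finding → Spec_proc grid visited acc loc prev finding (proc grid visited acc loc prev finding)

-- ===== LEMMAS AND PROOFS =====

theorem pvIsEdge_false_bounds {grid : List (List String)} {r c : Int} {finding : String}
    (h : pvIsEdge grid r c finding = false) : 0 ≤ r ∧ 0 ≤ c := by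
  simp only [pvIsEdge, Bool.or_eq_false_iff, Bool.not_eq_false', decide_eq_true_eq,
    decide_eq_false_iff_not, not_not] at h
  exact ⟨h.1.1.1, h.1.2.1⟩

-- marking an unvisited in-range cell removes exactly one unvisited cell
theorem pvCountFalse_set_succ (v : List (List Bool)) (r c : Int)
    (hv : pvVisAt v r c = some false) (hr : 0 ≤ r) (hc : 0 ≤ c) :
    pvCountFalse (pvVisSet v r c) + 1 = pvCountFalse v := by
  unfold pvVisAt at hv
  rw [PySem.List.pyGet?_of_nonneg _ hr] at hv
  rcases h1 : v[r.toNat]? with _ | row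
  · rw [h1] at hv; simp at hv
  · rw [h1] at hv
    simp only [Option.bind_some] at hv
    rw [PySem.List.pyGet?_of_nonneg _ hc] at hv
    have hrlen : r.toNat < v.length := by
      by_contra h; simp [List.getElem?_eq_none (by omega : v.length ≤ r.toNat)] at h1
    have hclen : c.toNat < row.length := by
      by_contra h; simp [List.getElem?_eq_none (by omega : row.length ≤ c.toNat)] at hv
    have hrow : v[r.toNat]'hrlen = row := by
      have := List.getElem?_eq_getElem hrlen (l := v); rw [h1] at this; exact (Option.some.inj this).symm
    have hcell : row[c.toNat]'hclen = false := by
      have := List.getElem?_eq_getElem hclen (l := row); rw [hv] at this; exact (Option.some.inj this).symm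
    unfold pvVisSet pvCountFalse
    have hgetD : v.getD r.toNat [] = row := by simp [List.getD, h1]
    rw [hgetD]
    have hv2 : v = v.take r.toNat ++ row :: v.drop (r.toNat + 1) := by
      conv_lhs => rw [← List.take_append_drop r.toNat v]
      congr 1
      rw [List.drop_eq_getElem_cons hrlen, hrow]
    have hset : v.set r.toNat (row.set c.toNat true)
        = v.take r.toNat ++ (row.set c.toNat true) :: v.drop (r.toNat + 1) := by
      conv_lhs => rw [hv2]
      rw [List.set_append]
      simp [List.length_take, Nat.min_eq_left (le_of_lt hrlen)]
    rw [hset]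
    conv_rhs => rw [hv2]
    simp only [List.map_append, List.map_cons, List.sum_append, List.sum_cons]
    have hcount : (row.set c.toNat true).count false + 1 = row.count false := by
      have hrow2 : row = row.take c.toNat ++ false :: row.drop (c.toNat + 1) := by
        conv_lhs => rw [← List.take_append_drop c.toNat row]
        congr 1
        rw [List.drop_eq_getElem_cons hclen, hcell]
      have hsetr : row.set c.toNat true
          = row.take c.toNat ++ true :: row.drop (c.toNat + 1) := by
        conv_lhs => rw [hrow2]
        rw [List.set_append]
        simp [List.length_take, Nat.min_eq_left (le_of_lt hclen)]
      rw [hsetr]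
      conv_rhs => rw [hrow2]
      simp [List.count_append]
      omega
    omega

theorem pvBF_nil (fuel : Nat) (grid : List (List String)) (finding : String)
    (visited : List (List Bool)) (edges : List ((Int × Int) × (Int × Int))) (area : Int) :
    procBLoopF fuel grid finding [] visited edges area = (visited, edges, area) := by
  cases fuel <;> rfl

-- A's accumulator is threaded linearly: with enough fuel, a call prepends a fixed edge
-- list E and adds a fixed area N, and never increases the number of unvisited cells.
theorem pvA_triple (grid : List (List String)) (finding : String) :
    ∀ (k : Nat) (visited : List (List Bool)), pvCountFalse visited < k →
      ∀ (loc prev : Int × Int),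
        ∃ (V : List (List Bool)) (E : List ((Int × Int) × (Int × Int))) (N : Int),
          pvCountFalse V ≤ pvCountFalse visited ∧
          ∀ (f : Nat), pvCountFalse visited < f →
            ∀ (acc : (List ((Int × Int) × (Int × Int))) × Int),
              procAuxF f grid visited acc loc prev finding = (V, (E ++ acc.1, acc.2 + N)) := by
  intro k
  induction k with
  | zero => intro _ h; omega
  | succ k ih =>
    intro visited hk loc prev
    by_cases hEdge : pvIsEdge grid loc.1 loc.2 finding = true
    · refine ⟨visited, [(prev, loc)], 0, le_refl _, fun f hf acc => ?_⟩
      cases f with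
      | zero => omega
      | succ f => simp [procAuxF, hEdge]
    · rw [Bool.not_eq_true] at hEdge
      by_cases hv : pvVisAt visited loc.1 loc.2 = some false
      · have hb := pvIsEdge_false_bounds hEdge
        have hset := pvCountFalse_set_succ visited loc.1 loc.2 hv hb.1 hb.2
        obtain ⟨V1, E1, N1, m1, h1⟩ := ih (pvVisSet visited loc.1 loc.2) (by omega) (loc.1 + 1, loc.2) loc
        obtain ⟨V2, E2, N2, m2, h2⟩ := ih V1 (by omega) (loc.1 - 1, loc.2) loc
        obtain ⟨V3, E3, N3, m3, h3⟩ := ih V2 (by omega) (loc.1, loc.2 + 1) loc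
        obtain ⟨V4, E4, N4, m4, h4⟩ := ih V3 (by omega) (loc.1, loc.2 - 1) loc
        refine ⟨V4, E4 ++ E3 ++ E2 ++ E1, 1 + N1 + N2 + N3 + N4, by omega, fun f hf acc => ?_⟩
        cases f with
        | zero => omega
        | succ f =>
          simp only [procAuxF, hEdge, Bool.false_eq_true, if_false, hv, if_true]
          rw [h1 f (by omega), h2 f (by omega), h3 f (by omega), h4 f (by omega)]
          refine Prod.ext rfl (Prod.ext ?_ ?_)
          · simp [List.append_assoc]
          · simp only []; omega
      · refine ⟨visited, [], 0, le_refl _, fun f hf acc => ?_⟩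
        cases f with
        | zero => omega
        | succ f => simp [procAuxF, hEdge, hv]

-- one recursive call of A = one frame of B's stack machine, with exact fuel accounting:
-- processing a frame costs one pop plus four further pops per newly visited cell
theorem pvB_sim (grid : List (List String)) (finding : String) :
    ∀ (k : Nat) (visited : List (List Bool)), pvCountFalse visited < k →
      ∀ (loc prev : Int × Int) (V : List (List Bool)) (E : List ((Int × Int) × (Int × Int))) (N : Int),
        pvCountFalse V ≤ pvCountFalse visited →
        (∀ (f : Nat), pvCountFalse visited < f →
          ∀ (acc : (List ((Int × Int) × (Int × Int))) × Int),
            procAuxF f grid visited acc loc prev finding = (V, (E ++ acc.1, acc.2 + N))) →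
        ∀ (stack : List ((Int × Int) × (Int × Int))) (edges : List ((Int × Int) × (Int × Int)))
          (area : Int) (fB : Nat), 4 * pvCountFalse visited + 1 ≤ fB →
          procBLoopF fB grid finding ((loc, prev) :: stack) visited edges area
            = procBLoopF (fB - (4 * (pvCountFalse visited - pvCountFalse V) + 1)) grid finding
                stack V (edges ++ E.reverse) (area + N) := by
  intro k
  induction k with
  | zero => intro _ h; omega
  | succ k ih =>
    intro visited hk loc prev V E N hm hT stack edges area fB hfB
    cases fB with
    | zero => omega
    | succ fB =>
    by_cases hEdge : pvIsEdge grid loc.1 loc.2 finding = true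
    · have hbase := hT (pvCountFalse visited + 1) (by omega) ([], 0)
      simp only [procAuxF, hEdge, if_true, List.append_nil, Prod.mk.injEq] at hbase
      obtain ⟨hV, hE, hN⟩ := hbase
      subst hV
      have hE' : E = [(prev, loc)] := hE.symm
      have hN' : N = 0 := by omega
      rw [hE', hN']
      simp only [procBLoopF, hEdge, if_true]
      have hsub : ∀ x : Nat, fB + 1 - (4 * (x - x) + 1) = fB := fun x => by omega
      rw [hsub]
      simp
    · rw [Bool.not_eq_true] at hEdge
      by_cases hv : pvVisAt visited loc.1 loc.2 = some false
      · have hb := pvIsEdge_false_bounds hEdge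
        have hset := pvCountFalse_set_succ visited loc.1 loc.2 hv hb.1 hb.2
        obtain ⟨V1, E1, N1, m1, h1⟩ := pvA_triple grid finding (pvCountFalse (pvVisSet visited loc.1 loc.2) + 1) (pvVisSet visited loc.1 loc.2) (by omega) (loc.1 + 1, loc.2) loc
        obtain ⟨V2, E2, N2, m2, h2⟩ := pvA_triple grid finding (pvCountFalse V1 + 1) V1 (by omega) (loc.1 - 1, loc.2) loc
        obtain ⟨V3, E3, N3, m3, h3⟩ := pvA_triple grid finding (pvCountFalse V2 + 1) V2 (by omega) (loc.1, loc.2 + 1) loc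
        obtain ⟨V4, E4, N4, m4, h4⟩ := pvA_triple grid finding (pvCountFalse V3 + 1) V3 (by omega) (loc.1, loc.2 - 1) loc
        -- decompose A's base run into the four sub-runs
        have hbase := hT (pvCountFalse visited + 1) (by omega) ([], 0)
        simp only [procAuxF, hEdge, Bool.false_eq_true, if_false, hv, if_true] at hbase
        rw [h1 (pvCountFalse visited) (by omega), h2 (pvCountFalse visited) (by omega),
          h3 (pvCountFalse visited) (by omega), h4 (pvCountFalse visited) (by omega)] at hbase
        simp only [List.append_nil, Prod.mk.injEq] at hbase
        obtain ⟨hV, hE, hN⟩ := hbase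
        -- run B's machine through the four pushed frames
        simp only [procBLoopF, hEdge, Bool.false_eq_true, if_false, hv, if_true]
        have s1 := ih (pvVisSet visited loc.1 loc.2) (by omega) (loc.1 + 1, loc.2) loc V1 E1 N1 m1 h1
        have s2 := ih V1 (by omega) (loc.1 - 1, loc.2) loc V2 E2 N2 m2 h2
        have s3 := ih V2 (by omega) (loc.1, loc.2 + 1) loc V3 E3 N3 m3 h3
        have s4 := ih V3 (by omega) (loc.1, loc.2 - 1) loc V4 E4 N4 m4 h4
        rw [s1 _ _ _ fB (by omega)]
        rw [s2 _ _ _ (fB - (4 * (pvCountFalse (pvVisSet visited loc.1 loc.2) - pvCountFalse V1) + 1)) (by omega)]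
        rw [s3 _ _ _ (fB - (4 * (pvCountFalse (pvVisSet visited loc.1 loc.2) - pvCountFalse V1) + 1)
          - (4 * (pvCountFalse V1 - pvCountFalse V2) + 1)) (by omega)]
        rw [s4 _ _ _ (fB - (4 * (pvCountFalse (pvVisSet visited loc.1 loc.2) - pvCountFalse V1) + 1)
          - (4 * (pvCountFalse V1 - pvCountFalse V2) + 1)
          - (4 * (pvCountFalse V2 - pvCountFalse V3) + 1)) (by omega)]
        rw [← hV, ← hE]
        have hN' : N = 1 + N1 + N2 + N3 + N4 := by omega
        rw [hN']
        have hfuel : fB - (4 * (pvCountFalse (pvVisSet visited loc.1 loc.2) - pvCountFalse V1) + 1)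
              - (4 * (pvCountFalse V1 - pvCountFalse V2) + 1)
              - (4 * (pvCountFalse V2 - pvCountFalse V3) + 1)
              - (4 * (pvCountFalse V3 - pvCountFalse V4) + 1)
            = fB + 1 - (4 * (pvCountFalse visited - pvCountFalse V4) + 1) := by omega
        rw [hfuel]
        have hedges : edges ++ E1.reverse ++ E2.reverse ++ E3.reverse ++ E4.reverse
            = edges ++ (E4 ++ (E3 ++ (E2 ++ E1))).reverse := by
          simp [List.append_assoc]
        have harea : area + 1 + N1 + N2 + N3 + N4 = area + (1 + N1 + N2 + N3 + N4) := by omega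
        rw [hedges, harea]
      · have hbase := hT (pvCountFalse visited + 1) (by omega) ([], 0)
        simp only [procAuxF, hEdge, Bool.false_eq_true, if_false, hv, if_true,
          List.append_nil, Prod.mk.injEq] at hbase
        obtain ⟨hV, hE, hN⟩ := hbase
        subst hV
        have hE' : E = [] := hE.symm
        have hN' : N = 0 := by omega
        rw [hE', hN']
        simp only [procBLoopF, hEdge, Bool.false_eq_true, if_false, hv, if_true]
        have hsub : ∀ x : Nat, fB + 1 - (4 * (x - x) + 1) = fB := fun x => by omega
        rw [hsub]
        simp

-- ===== VERDICT (by name: the statement is the Claim_ definition above) =====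
theorem proc_spec : Claim_equal_proc := by
  intro grid visited acc loc prev finding _ _
  unfold Spec_proc proc proc_alt
  obtain ⟨V, E, N, hm, hT⟩ := pvA_triple grid finding (pvCountFalse visited + 1) visited (by omega) loc prev
  have hB := pvB_sim grid finding (pvCountFalse visited + 1) visited (by omega) loc prev V E N hm hT
    [] [] 0 (4 * pvCountFalse visited + 1) (by omega)
  rw [pvBF_nil] at hB
  rw [hT (pvCountFalse visited + 1) (by omega) acc, hB]
  simp
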